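-- pv_equiv track=rewrite | github.com/darkwing-09/Agentic_AI | research_paper_agent/nodes/node5_latex_formatter.py | _convert_bullet_list
-- ===== SOURCE A (Python) =====
-- def _convert_bullet_list(text: str) -> str:
--     """
--     Converts Markdown bullet lists (- item or * item) to LaTeX itemize.
--     Groups consecutive bullet lines into a single environment.
--     """
--     lines = text.split("\n")
--     result = []
--     in_list = False
--
--     for line in lines:
--         stripped = line.strip()
--
--         is_bullet = stripped.startswith("- ") or stripped.startswith("* ")
--
--         if is_bullet and not in_list:
--             result.append("\\begin{itemize}")
--             in_list = True
--
--         if is_bullet: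
--             item_text = stripped[2:].strip()
--             result.append(f"  \\item {item_text}")
--         else:
--             if in_list:
--                 result.append("\\end{itemize}")
--                 in_list = False
--             result.append(line)
--
--     if in_list:
--         result.append("\\end{itemize}")
--
--     return "\n".join(result)
-- ===== SOURCE B (Python) =====
-- from itertools import groupby
--
--
-- def _convert_bullet_list(text: str) -> str:
--     def is_bullet(line: str) -> bool:
--         s = line.strip()
--         return s.startswith("- ") or s.startswith("* ")
--
--     out = []
--     for bullet, run in groupby(text.split("\n"), key=is_bullet):
--         if bullet:
--             out.append("\\begin{itemize}")
--             out.extend(f"  \\item {line.strip()[2:].strip()}" for line in run)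
--             out.append("\\end{itemize}")
--         else:
--             out.extend(run)
--     return "\n".join(out)
-- ===== Notes on version B (the rewrite author's own statement) =====
-- stated objective: idiomatic
-- what changed: Replaces the stateful in_list flag machine with itertools.groupby: lines are split into maximal consecutive runs by a bullet/non-bullet key and each run is rendered as a whole (wrapped in itemize or emitted verbatim).
import Mathlib
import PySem

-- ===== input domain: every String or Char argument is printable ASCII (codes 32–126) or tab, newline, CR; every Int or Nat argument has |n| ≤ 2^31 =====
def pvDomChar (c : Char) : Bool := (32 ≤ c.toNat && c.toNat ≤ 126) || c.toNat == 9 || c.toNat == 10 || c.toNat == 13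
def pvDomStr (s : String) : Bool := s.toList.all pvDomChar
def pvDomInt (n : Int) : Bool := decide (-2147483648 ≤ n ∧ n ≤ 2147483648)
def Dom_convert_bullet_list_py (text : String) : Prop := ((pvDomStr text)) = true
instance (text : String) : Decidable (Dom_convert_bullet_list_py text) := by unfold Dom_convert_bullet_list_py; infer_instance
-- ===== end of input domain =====

-- B replaces A's stateful in_list flag machine with a groupby decomposition
-- (maximal bullet/non-bullet runs rendered wholesale); idiomatic, same cost.

-- ===== PORT A =====
-- A's for-loop over lines with the in_list flag; emits output pieces in order.
def pvALoop : List String → Bool → List String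
  | [], inList => if inList then ["\\end{itemize}"] else []
  | line :: rest, inList =>
    let stripped := PySem.Str.strip line
    let isBullet := PySem.Str.startswith stripped "- " || PySem.Str.startswith stripped "* "
    (if isBullet && !inList then ["\\begin{itemize}"] else []) ++
    (if isBullet then ["  \\item " ++ PySem.Str.strip (PySem.Str.slice stripped (some 2) none)]
     else (if inList then ["\\end{itemize}"] else []) ++ [line]) ++
    pvALoop rest isBullet

def convert_bullet_list_py (text : String) : String :=
  PySem.Str.join "\n" (pvALoop ((PySem.Str.split? text "\n").getD []) false)

-- ===== PORT B =====
-- is_bullet, the groupby key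
def pvKey (line : String) : Bool :=
  let s := PySem.Str.strip line
  PySem.Str.startswith s "- " || PySem.Str.startswith s "* "

-- itertools.groupby(lines, key=pvKey): maximal consecutive runs with their key
def pvGroups : List String → List (Bool × List String)
  | [] => []
  | l :: ls =>
    (pvKey l, l :: ls.takeWhile (fun x => pvKey x == pvKey l)) ::
      pvGroups (ls.dropWhile (fun x => pvKey x == pvKey l))
termination_by ls => ls.length
decreasing_by
  simpa using Nat.lt_succ_of_le (List.length_dropWhile_le _ _)

def pvItem (line : String) : String :=
  "  \\item " ++ PySem.Str.strip (PySem.Str.slice (PySem.Str.strip line) (some 2) none)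

-- the body of B's for-loop: render one run
def pvRender (g : Bool × List String) : List String :=
  if g.1 then "\\begin{itemize}" :: (g.2.map pvItem ++ ["\\end{itemize}"]) else g.2

def convert_bullet_list_py_alt (text : String) : String :=
  PySem.Str.join "\n" ((pvGroups ((PySem.Str.split? text "\n").getD [])).flatMap pvRender)

-- ===== PRECONDITION & SPEC =====
def Spec_convert_bullet_list_py (text : String) (out : String) : Prop := out = convert_bullet_list_py_alt text
instance (text : String) (out : String) : Decidable (Spec_convert_bullet_list_py text out) := by unfold Spec_convert_bullet_list_py; infer_instance

-- ===== CLAIM (what is proved, stated in full; the proofs are below) =====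
def Claim_equal_convert_bullet_list_py : Prop := ∀ (text : String), Dom_convert_bullet_list_py text → Spec_convert_bullet_list_py text (convert_bullet_list_py text)

-- ===== LEMMAS AND PROOFS =====

-- one step of A's loop, phrased through B's key/item helpers (definitional)
theorem pvALoop_cons (l : String) (ls : List String) (b : Bool) :
    pvALoop (l :: ls) b =
      (if pvKey l && !b then ["\\begin{itemize}"] else []) ++
      ((if pvKey l then [pvItem l] else (if b then ["\\end{itemize}"] else []) ++ [l]) ++
        pvALoop ls (pvKey l)) := by
  simp only [pvALoop, pvKey, pvItem, List.append_assoc]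
  rfl

-- A's loop on a non-bullet head just copies the line
theorem pvALoop_false_cons_not (l : String) (ls : List String) (h : pvKey l = false) :
    pvALoop (l :: ls) false = l :: pvALoop ls false := by
  rw [pvALoop_cons, h]; simp

-- A's loop on a bullet head in non-list state opens the environment
theorem pvALoop_false_cons_bul (l : String) (ls : List String) (h : pvKey l = true) :
    pvALoop (l :: ls) false = "\\begin{itemize}" :: pvItem l :: pvALoop ls true := by
  rw [pvALoop_cons, h]; simp

-- inside a list, A emits items for the bullet prefix, closes, and resumes in state false
theorem pvALoop_true (ls : List String) :
    pvALoop ls true =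
      (ls.takeWhile pvKey).map pvItem ++ "\\end{itemize}" :: pvALoop (ls.dropWhile pvKey) false := by
  induction ls with
  | nil => simp [pvALoop]
  | cons l ls ih =>
    rw [pvALoop_cons]
    cases h : pvKey l with
    | true => simp [h, ih]
    | false => simp [h, pvALoop_false_cons_not l ls h]

-- out of a list, A copies the maximal non-bullet prefix verbatim
theorem pvALoop_false_prefix (ls : List String) :
    pvALoop ls false =
      ls.takeWhile (fun x => !pvKey x) ++ pvALoop (ls.dropWhile (fun x => !pvKey x)) false := by
  induction ls with
  | nil => simp
  | cons l ls ih =>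
    cases h : pvKey l with
    | true => simp [h]
    | false => simp [h, pvALoop_false_cons_not l ls h, ih]

-- main correspondence: A's flag machine = B's groupby rendering
theorem pvALoop_eq_groups (ls : List String) :
    pvALoop ls false = (pvGroups ls).flatMap pvRender := by
  induction ls using pvGroups.induct with
  | case1 => simp [pvGroups, pvALoop]
  | case2 l ls ih =>
    rw [pvGroups]
    cases h : pvKey l with
    | true =>
      have e : (fun x => pvKey x == true) = pvKey := by funext x; simp
      simp only [h] at ih
      rw [e] at ih ⊢
      rw [pvALoop_false_cons_bul l ls h, pvALoop_true, ih]
      simp [pvRender]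
    | false =>
      have e : (fun x => pvKey x == false) = (fun x => !pvKey x) := by funext x; simp
      simp only [h] at ih
      rw [e] at ih ⊢
      rw [pvALoop_false_cons_not l ls h, pvALoop_false_prefix ls, ih]
      simp [pvRender]

-- ===== VERDICT (by name: the statement is the Claim_ definition above) =====
theorem convert_bullet_list_py_spec : Claim_equal_convert_bullet_list_py := by
  intro text _
  unfold Spec_convert_bullet_list_py convert_bullet_list_py convert_bullet_list_py_alt
  rw [pvALoop_eq_groups]
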